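-- pv_equiv track=rewrite | github.com/agamenonjunior/Python | Desafios.py | espelho
-- ===== SOURCE A (Python) =====
-- def espelho(L):
--     texto = L
--     L = [ ]
--     L2 = [ ]
--     for str1 in texto:
--         L.append(str1)
--         L2 = L + L[::-1]
--     return(L2)
-- ===== SOURCE B (Python) =====
-- def espelho(L):
--     chars = list(L)
--     n = len(chars)
--     out = [""] * (2 * n)
--     for i, c in enumerate(chars):
--         out[i] = c
--         out[2 * n - 1 - i] = c
--     return out
-- ===== Notes on version B (the rewrite author's own statement) =====
-- stated objective: faster
-- what changed: Replaces the loop that re-concatenates the growing list with its reverse on every iteration by a single symmetric two-pointer fill into a preallocated list of length 2n.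
import Mathlib
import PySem

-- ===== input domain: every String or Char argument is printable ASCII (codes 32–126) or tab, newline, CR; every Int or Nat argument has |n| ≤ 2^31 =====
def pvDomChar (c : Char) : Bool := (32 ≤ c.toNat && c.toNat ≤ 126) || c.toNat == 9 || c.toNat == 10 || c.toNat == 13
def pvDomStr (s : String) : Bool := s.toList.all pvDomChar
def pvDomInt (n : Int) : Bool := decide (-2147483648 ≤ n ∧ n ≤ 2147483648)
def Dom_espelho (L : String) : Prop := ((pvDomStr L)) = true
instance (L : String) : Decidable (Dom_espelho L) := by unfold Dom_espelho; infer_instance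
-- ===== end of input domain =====

-- B replaces A's quadratic rebuild of "list + reverse" on every iteration by one
-- symmetric two-pointer fill into a preallocated list (objective: faster).

-- ===== PORT A =====
-- state: (L, L2); each iteration appends the char and recomputes L2 = L + L[::-1]
-- (xs[::-1] is exactly List.reverse)
def espelho (L : String) : List String :=
  (L.toList.foldl
    (fun (st : List String × List String) str1 =>
      let l := st.1 ++ [String.singleton str1]
      (l, l ++ l.reverse))
    ([], [])).2

-- ===== PORT B =====
-- chars = list(L); out = [""]*(2n); for i,c in enumerate(chars): out[i]=c; out[2n-1-i]=c
def espelho_alt (L : String) : List String :=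
  let chars := L.toList
  let n := chars.length
  let out : List String := List.replicate (2 * n) ""
  (PySem.List.enumerate chars).foldl
    (fun out ic =>
      PySem.List.pySetD
        (PySem.List.pySetD out ic.1 (String.singleton ic.2))
        (2 * (n : Int) - 1 - ic.1) (String.singleton ic.2))
    out

-- ===== PRECONDITION & SPEC =====
def Spec_espelho (L : String) (out : List String) : Prop := out = espelho_alt L
instance (L : String) (out : List String) : Decidable (Spec_espelho L out) := by unfold Spec_espelho; infer_instance

-- ===== CLAIM (what is proved, stated in full; the proofs are below) =====
def Claim_equal_espelho : Prop := ∀ (L : String), Dom_espelho L → Spec_espelho L (espelho L)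

-- ===== LEMMAS AND PROOFS =====

theorem espelho_foldA (cs : List Char) : ∀ (pre x : List String),
    (cs.foldl (fun (st : List String × List String) str1 =>
      let l := st.1 ++ [String.singleton str1]
      (l, l ++ l.reverse)) (pre, x)).2
    = if cs = [] then x else
        (pre ++ cs.map String.singleton) ++ (pre ++ cs.map String.singleton).reverse := by
  induction cs with
  | nil => intro pre x; simp
  | cons c cs ih =>
    intro pre x
    simp only [List.foldl_cons, ih]
    by_cases h : cs = [] <;> simp [h]

theorem set_len_add (l₁ : List String) : ∀ (l₂ : List String) (k : Nat) (v : String),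
    (l₁ ++ l₂).set (l₁.length + k) v = l₁ ++ l₂.set k v := by
  induction l₁ with
  | nil => intro l₂ k v; simp
  | cons a l₁ ih => intro l₂ k v; simp [Nat.succ_add, ih]

theorem espelho_fillB (n : Nat) (suf : List Char) : ∀ (pre : List String) (i : Nat),
    pre.length = i → n = i + suf.length →
    (PySem.List.enumerate suf (i : Int)).foldl
      (fun out ic =>
        PySem.List.pySetD
          (PySem.List.pySetD out ic.1 (String.singleton ic.2))
          (2 * (n : Int) - 1 - ic.1) (String.singleton ic.2))
      (pre ++ List.replicate (2 * (n - i)) "" ++ pre.reverse)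
    = (pre ++ suf.map String.singleton) ++ (pre ++ suf.map String.singleton).reverse := by
  induction suf with
  | nil =>
    intro pre i hp hn
    simp [PySem.List.enumerate, hn]
  | cons c suf ih =>
    intro pre i hp hn
    have hni : i + 1 ≤ n := by simp at hn; omega
    have hrep : List.replicate (2 * (n - i)) ("" : String)
        = "" :: (List.replicate (2 * (n - (i + 1))) "" ++ [""]) := by
      have h2 : 2 * (n - i) = (2 * (n - (i + 1)) + 1) + 1 := by omega
      rw [h2, List.replicate_succ, List.replicate_succ']
    rw [PySem.List.enumerate_cons, List.foldl_cons, hrep]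
    -- first write: out[i] = c
    have hset1 :
        PySem.List.pySetD
          (pre ++ ("" :: (List.replicate (2 * (n - (i + 1))) "" ++ [""])) ++ pre.reverse)
          (i : Int) (String.singleton c)
        = pre ++ (String.singleton c :: (List.replicate (2 * (n - (i + 1))) "" ++ [""] ++ pre.reverse)) := by
      rw [PySem.List.pySetD_natCast, List.append_assoc]
      have := set_len_add pre ("" :: (List.replicate (2 * (n - (i + 1))) "" ++ [""] ++ pre.reverse)) 0 (String.singleton c)
      simpa [hp] using this
    -- second write: out[2n-1-i] = c
    have hset2 :
        PySem.List.pySetD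
          (pre ++ (String.singleton c :: (List.replicate (2 * (n - (i + 1))) "" ++ [""] ++ pre.reverse)))
          (2 * (n : Int) - 1 - (i : Int)) (String.singleton c)
        = (pre ++ [String.singleton c]) ++ (List.replicate (2 * (n - (i + 1))) "" ++ ((pre ++ [String.singleton c]).reverse)) := by
      rw [PySem.List.pySetD_of_nonneg _ _ (by omega)]
      have ht : (2 * (n : Int) - 1 - (i : Int)).toNat = i + (2 * (n - (i + 1)) + 1) := by omega
      rw [ht, ← hp]
      rw [set_len_add]
      simp only [List.set_cons_succ]
      simp
    rw [hset1, hset2]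
    have hIH := ih (pre ++ [String.singleton c]) (i + 1) (by simp [hp]) (by simp at hn ⊢; omega)
    have hcast : ((i : Int) + 1) = ((i + 1 : Nat) : Int) := by push_cast; ring
    rw [hcast]
    simpa [List.append_assoc] using hIH

theorem espelho_alt_closed (L : String) :
    espelho_alt L = (L.toList.map String.singleton) ++ (L.toList.map String.singleton).reverse := by
  have h := espelho_fillB L.toList.length L.toList [] 0 rfl (by simp)
  simpa [espelho_alt] using h

-- ===== VERDICT (by name: the statement is the Claim_ definition above) =====
theorem espelho_spec : Claim_equal_espelho := by
  intro L _
  unfold Spec_espelho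
  rw [espelho_alt_closed]
  unfold espelho
  rw [espelho_foldA]
  by_cases h : L.toList = [] <;> simp [h]
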